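-- pv_equiv track=rewrite | github.com/RespectedCow/Privatus | src/commons.py | refine_path
-- ===== SOURCE A (Python) =====
-- def refine_path(path):
--     char_count = 0
--     refined_path = ""
--
--     for char in path:
--         char_count += 1
--
--         if char_count != len(path):
--             refined_path = refined_path + char
--         else:
--             if char != "/":
--                 refined_path = refined_path + char
--
--     return refined_path
-- ===== SOURCE B (Python) =====
-- def refine_path(path):
--     return path[:-1] if path.endswith("/") else path
-- ===== Notes on version B (the rewrite author's own statement) =====
-- stated objective: idiomatic
-- what changed: Replaced the character-by-character accumulation loop with a counter by a single endswith test plus a [:-1] slice.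
import Mathlib
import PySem

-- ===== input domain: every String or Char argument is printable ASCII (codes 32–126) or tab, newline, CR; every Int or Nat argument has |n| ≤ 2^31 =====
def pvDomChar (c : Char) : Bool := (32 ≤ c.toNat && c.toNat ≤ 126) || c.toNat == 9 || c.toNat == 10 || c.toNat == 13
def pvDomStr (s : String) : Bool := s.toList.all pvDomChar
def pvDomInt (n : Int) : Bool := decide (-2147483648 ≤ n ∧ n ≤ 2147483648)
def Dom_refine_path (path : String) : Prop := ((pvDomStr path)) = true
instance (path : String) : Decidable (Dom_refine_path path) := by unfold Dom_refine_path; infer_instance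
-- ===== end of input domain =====

-- B replaces A's char-accumulation loop with an endswith test plus a [:-1] slice (idiomatic).

-- ===== PORT A =====
-- A's loop body: char_count += 1; append char unless char_count == len(path) and char == '/'
def refine_path_step (n : Nat) (st : Nat × String) (ch : Char) : Nat × String :=
  let cc := st.1 + 1
  if cc ≠ n then (cc, st.2 ++ String.singleton ch)
  else if ch ≠ '/' then (cc, st.2 ++ String.singleton ch)
  else (cc, st.2)

def refine_path (path : String) : String :=
  (path.toList.foldl (refine_path_step path.toList.length) (0, "")).2

-- ===== PORT B =====
def refine_path_alt (path : String) : String :=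
  if PySem.Str.endswith path "/" then PySem.Str.slice path none (some (-1)) else path

-- ===== PRECONDITION & SPEC =====
def Spec_refine_path (path : String) (out : String) : Prop := out = refine_path_alt path
instance (path : String) (out : String) : Decidable (Spec_refine_path path out) := by unfold Spec_refine_path; infer_instance

-- ===== CLAIM (what is proved, stated in full; the proofs are below) =====
def Claim_equal_refine_path : Prop := ∀ (path : String), Dom_refine_path path → Spec_refine_path path (refine_path path)

-- ===== LEMMAS AND PROOFS =====

-- A's loop appends every char except a final '/'
theorem refine_path_loop (n : Nat) :
    ∀ (cs : List Char) (k : Nat) (acc : String), k + cs.length = n →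
      ((cs.foldl (refine_path_step n) (k, acc)).2).toList =
        acc.toList ++ (if cs.getLast? = some '/' then cs.dropLast else cs) := by
  intro cs
  induction cs with
  | nil => intro k acc h; simp
  | cons c rest ih =>
    intro k acc h
    cases rest with
    | nil =>
      simp at h
      simp [refine_path_step, h]
      by_cases hc : c = '/' <;> simp [hc]
    | cons d rest' =>
      have hne : k + 1 ≠ n := by simp at h; omega
      have hstep : (refine_path_step n (k, acc) c) = (k + 1, acc ++ String.singleton c) := by
        simp [refine_path_step, hne]
      rw [List.foldl_cons, hstep, ih (k+1) _ (by simp at h ⊢; omega)]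
      by_cases hl : (d :: rest').getLast? = some '/' <;> simp [hl]

theorem refine_path_eq (path : String) :
    (refine_path path).toList =
      (if path.toList.getLast? = some '/' then path.toList.dropLast else path.toList) := by
  unfold refine_path
  rw [refine_path_loop path.toList.length path.toList 0 "" (by simp)]
  simp

-- ===== VERDICT (by name: the statement is the Claim_ definition above) =====
theorem refine_path_spec : Claim_equal_refine_path := by
  intro path _
  show refine_path path = refine_path_alt path
  apply String.toList_inj.mp
  unfold refine_path_alt
  by_cases h : PySem.Str.endswith path "/" = true
  · have hsuf : "/".toList <:+ path.toList := by
      simpa [PySem.Str.endswith, PySem.Chars.endswith_iff] using h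
    have hlast : path.toList.getLast? = some '/' := by
      obtain ⟨t, ht⟩ := hsuf
      rw [← ht]; simp
    rw [if_pos h, PySem.Str.slice_to_neg_one, refine_path_eq, if_pos hlast]
  · have hlast : path.toList.getLast? ≠ some '/' := by
      intro hl
      apply h
      obtain ⟨l', hl'⟩ := List.getLast?_eq_some_iff.mp hl
      have hsuf : "/".toList <:+ path.toList := ⟨l', by simp [hl']⟩
      simpa [PySem.Str.endswith, PySem.Chars.endswith_iff] using hsuf
    rw [if_neg h, refine_path_eq, if_neg hlast]
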